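-- pv_equiv track=rewrite | github.com/leba0tu/baitap-python- | 03-04 Số siêu đẹp.py | sodep
-- ===== SOURCE A (Python) =====
-- def sodep(n):
--     so8 = False
--     for i in str(n):
--         if i not in ('6', '8'):
--             return False
--         if i == '8':
--             so8 = True
--         if i == '6' and so8:
--             return False
--     return True
-- ===== SOURCE B (Python) =====
-- def sodep(n):
--     s = str(n)
--     rest = s.lstrip('6')
--     return all(c == '8' for c in rest)
-- ===== Notes on version B (the rewrite author's own statement) =====
-- stated objective: simpler
-- what changed: Replaces the stateful so8-flag loop with a two-phase form: strip the leading run of 6s, then check every remaining character is 8.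
import Mathlib
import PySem

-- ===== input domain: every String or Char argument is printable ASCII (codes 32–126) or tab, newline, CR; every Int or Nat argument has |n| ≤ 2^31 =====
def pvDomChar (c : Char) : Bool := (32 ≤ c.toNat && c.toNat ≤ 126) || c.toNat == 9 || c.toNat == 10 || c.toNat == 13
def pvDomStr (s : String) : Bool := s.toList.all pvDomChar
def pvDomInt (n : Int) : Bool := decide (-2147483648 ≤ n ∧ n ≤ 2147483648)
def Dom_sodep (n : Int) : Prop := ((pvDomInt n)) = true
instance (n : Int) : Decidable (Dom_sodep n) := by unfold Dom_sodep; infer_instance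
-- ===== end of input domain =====

-- B replaces A's stateful so8-flag loop by stripping the leading 6s and checking the rest is all 8s (simpler decomposition).


-- ===== PORT A =====
-- the for-loop over str(n) with the so8 flag, early returns become base cases
def sodepLoop : List Char → Bool → Bool
  | [], _ => true
  | c :: cs, so8 =>
    if ¬(c = '6' ∨ c = '8') then false
    else
      let so8' := if c = '8' then true else so8
      if c = '6' ∧ so8' then false
      else sodepLoop cs so8'

def sodep (n : Int) : Bool := sodepLoop (PySem.Int.toStr n).toList false

-- ===== PORT B =====
-- s.lstrip('6') = dropWhile (= '6'); all(c == '8' for c in rest)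
def sodep_alt (n : Int) : Bool :=
  (((PySem.Int.toStr n).toList.dropWhile (· == '6')).all (· == '8'))

-- ===== PRECONDITION & SPEC =====
def Spec_sodep (n : Int) (out : Bool) : Prop := out = sodep_alt n
instance (n : Int) (out : Bool) : Decidable (Spec_sodep n out) := by unfold Spec_sodep; infer_instance

-- ===== CLAIM (what is proved, stated in full; the proofs are below) =====
def Claim_equal_sodep : Prop := ∀ (n : Int), Dom_sodep n → Spec_sodep n (sodep n)

-- ===== LEMMAS AND PROOFS =====
theorem sodepLoop_true (cs : List Char) : sodepLoop cs true = cs.all (· == '8') := by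
  induction cs with
  | nil => rfl
  | cons c cs ih =>
    by_cases h6 : c = '6'
    · subst h6; simp [sodepLoop]
    · by_cases h8 : c = '8'
      · subst h8; simp [sodepLoop, ih]
      · simp [sodepLoop, h6, h8]

theorem sodepLoop_false (cs : List Char) :
    sodepLoop cs false = (cs.dropWhile (· == '6')).all (· == '8') := by
  induction cs with
  | nil => rfl
  | cons c cs ih =>
    by_cases h6 : c = '6'
    · subst h6; simpa [sodepLoop, List.dropWhile] using ih
    · by_cases h8 : c = '8'
      · subst h8; simp [sodepLoop, List.dropWhile, sodepLoop_true cs]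
      · simp [sodepLoop, h6, h8]

-- ===== VERDICT (by name: the statement is the Claim_ definition above) =====
theorem sodep_spec : Claim_equal_sodep := by
  intro n _
  unfold Spec_sodep sodep sodep_alt
  exact sodepLoop_false _
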